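-- pv_equiv track=rewrite | github.com/yoonjoong/Programmers-Algorithm | Lv2/Lv2_기능개발.py | solution
-- ===== SOURCE A (Python) =====
-- import math
--
-- def solution(progresses, speeds):
--     answer = []
--     completed = []
--     for i in range(len(progresses)):
--         time = math.ceil((100 - progresses[i])/speeds[i])
--         completed.append(time)
--     idx=0
--     for i in range(len(completed)):
--         if completed[i] > completed[idx]:
--             answer.append(i-idx)
--             idx=i
--     answer.append(len(completed)-idx)
--     return answer
-- ===== SOURCE B (Python) =====
-- def solution(progresses, speeds):
--     # completion day per feature: exact ceiling division via floor-div (no floats)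
--     days = [-((progresses[i] - 100) // speeds[i]) for i in range(len(progresses))]
--     answer = []
--     while days:
--         front = days[0]
--         count = 1
--         while count < len(days) and days[count] <= front:
--             count += 1
--         answer.append(count)
--         days = days[count:]
--     return answer
-- ===== Notes on version B (the rewrite author's own statement) =====
-- stated objective: alternative
-- what changed: B replaces A's float math.ceil with exact integer ceiling division and replaces A's index-pointer scan over the completed-days list with a consume-the-leader-then-drain-followers queue traversal that slices each finished group off the front.
-- intended difference: On empty progresses A returns [0] (its unconditional trailing append counts a phantom deployment); B returns [], the intended answer when there are no features to deploy. — e.g. on solution([], []): A returns [0], B returns []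
import Mathlib
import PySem

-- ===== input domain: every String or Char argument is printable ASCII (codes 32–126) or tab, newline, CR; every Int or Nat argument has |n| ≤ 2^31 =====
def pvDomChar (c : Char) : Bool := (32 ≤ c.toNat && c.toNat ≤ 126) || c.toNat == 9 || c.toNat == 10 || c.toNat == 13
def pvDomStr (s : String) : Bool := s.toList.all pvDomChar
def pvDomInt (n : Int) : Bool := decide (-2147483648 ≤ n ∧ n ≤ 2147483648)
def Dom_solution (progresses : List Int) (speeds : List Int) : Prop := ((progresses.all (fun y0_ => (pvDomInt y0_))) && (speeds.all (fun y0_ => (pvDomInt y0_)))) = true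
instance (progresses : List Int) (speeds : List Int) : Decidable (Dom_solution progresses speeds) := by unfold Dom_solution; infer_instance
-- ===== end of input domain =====

-- B replaces the float-ceil + index-pointer scan with exact integer ceiling division and a
-- drain-the-group-from-the-front queue traversal (alternative decomposition, same O(n) cost).


-- ===== PORT A =====
-- math.ceil((100-p)/s): Python computes a float division and ceils it; on Dom (|ints| ≤ 2^31)
-- the true quotient is never strictly between an integer and that integer's nearest double,
-- so the float ceil equals the exact rational ceiling, ported as -((-a) // b); s = 0
-- (ZeroDivisionError) is excluded by Pre_solution.
def pyCeilDiv (a b : Int) : Int := -(PySem.Int.floordiv (-a) b)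

def buildCompleted (progresses speeds : List Int) : List Int :=
  (List.range progresses.length).foldl
    (fun (completed : List Int) (i : Nat) =>
      completed ++ [pyCeilDiv (100 - PySem.List.pyGetD progresses (i : Int) 0)
                              (PySem.List.pyGetD speeds (i : Int) 0)]) []

def stepA (completed : List Int) (st : List Int × Nat) (i : Nat) : List Int × Nat :=
  if PySem.List.pyGetD completed (i : Int) 0 > PySem.List.pyGetD completed (st.2 : Int) 0 then
    (st.1 ++ [(i : Int) - (st.2 : Int)], i)
  else st

def solution (progresses : List Int) (speeds : List Int) : List Int :=
  let completed := buildCompleted progresses speeds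
  let st := (List.range completed.length).foldl (stepA completed) ([], 0)
  st.1 ++ [(completed.length : Int) - (st.2 : Int)]

-- ===== PORT B =====
-- inner while: `while count < len(days) and days[count] <= front: count += 1`
-- (fuel = days.length bounds the loop; it only makes the recursion structural, the
-- computation is the Python loop step for step)
def innerCount (fuel : Nat) (days : List Int) (front : Int) (count : Nat) : Nat :=
  match fuel with
  | 0 => count
  | fuel + 1 =>
    if count < days.length ∧ PySem.List.pyGetD days (count : Int) 0 ≤ front then
      innerCount fuel days front (count + 1)
    else count

-- outer while: pop the leading group (leader + followers ≤ leader) off `days`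
-- (fuel = initial days.length; every iteration drops at least one element)
def outerLoop (fuel : Nat) (days : List Int) (answer : List Int) : List Int :=
  match fuel with
  | 0 => answer
  | fuel + 1 =>
    match days with
    | [] => answer
    | d :: ds =>
      let front := d
      let count := innerCount (d :: ds).length (d :: ds) front 1
      outerLoop fuel ((d :: ds).drop count) (answer ++ [(count : Int)])

def solution_alt (progresses : List Int) (speeds : List Int) : List Int :=
  let days := (List.range progresses.length).map
    (fun (i : Nat) => -(PySem.Int.floordiv (PySem.List.pyGetD progresses (i : Int) 0 - 100)
                                           (PySem.List.pyGetD speeds (i : Int) 0)))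
  outerLoop days.length days []

-- ===== PRECONDITION & SPEC =====
-- A raises IndexError when speeds is shorter than progresses and ZeroDivisionError on a zero
-- speed it uses; exactly those inputs are excluded.
def Pre_solution (progresses : List Int) (speeds : List Int) : Prop :=
  progresses.length ≤ speeds.length ∧ ∀ i < progresses.length, speeds.getD i 0 ≠ 0
instance (progresses : List Int) (speeds : List Int) : Decidable (Pre_solution progresses speeds) := by
  unfold Pre_solution; infer_instance

def pvWitness_solution : List Int × List Int := ([93, 30, 55], [1, 30, 5])

-- On empty progresses A returns [0] (its unconditional trailing append counts a phantom
-- deployment); B returns [], the intended answer when there are no features to deploy.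
def D_solution (progresses : List Int) (speeds : List Int) : Prop := progresses = []
instance (progresses : List Int) (speeds : List Int) : Decidable (D_solution progresses speeds) := by
  unfold D_solution; infer_instance

def Spec_solution (progresses : List Int) (speeds : List Int) (out : List Int) : Prop :=
  ¬ D_solution progresses speeds → out = solution_alt progresses speeds
instance (progresses : List Int) (speeds : List Int) (out : List Int) : Decidable (Spec_solution progresses speeds out) := by
  unfold Spec_solution; infer_instance

def pvDiffWitness_solution : List Int × List Int := ([], [])
def pvDiffWitnessOut_solution : (List Int) × (List Int) := ([0], [])

-- ===== CLAIM (what is proved, stated in full; the proofs are below) =====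
def Claim_unchanged_solution : Prop := ∀ (progresses : List Int) (speeds : List Int), Dom_solution progresses speeds → Pre_solution progresses speeds → Spec_solution progresses speeds (solution progresses speeds)
def Claim_changed_solution : Prop := Dom_solution (pvDiffWitness_solution.1) (pvDiffWitness_solution.2) ∧ Pre_solution (pvDiffWitness_solution.1) (pvDiffWitness_solution.2) ∧ D_solution (pvDiffWitness_solution.1) (pvDiffWitness_solution.2) ∧ solution (pvDiffWitness_solution.1) (pvDiffWitness_solution.2) = pvDiffWitnessOut_solution.1 ∧ solution_alt (pvDiffWitness_solution.1) (pvDiffWitness_solution.2) = pvDiffWitnessOut_solution.2 ∧ pvDiffWitnessOut_solution.1 ≠ pvDiffWitnessOut_solution.2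
def Claim_exact_solution : Prop := ∀ (progresses : List Int) (speeds : List Int), Dom_solution progresses speeds → Pre_solution progresses speeds → D_solution progresses speeds → solution progresses speeds ≠ solution_alt progresses speeds

-- ===== LEMMAS AND PROOFS =====

-- the completion-day list both ports build
def daysOf (progresses speeds : List Int) : List Int :=
  (List.range progresses.length).map
    (fun (i : Nat) => -(PySem.Int.floordiv (PySem.List.pyGetD progresses (i : Int) 0 - 100)
                                           (PySem.List.pyGetD speeds (i : Int) 0)))

theorem buildCompleted_eq (p s : List Int) : buildCompleted p s = daysOf p s := by
  unfold buildCompleted daysOf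
  rw [PySem.List.foldl_append_singleton_eq_map]
  simp only [List.nil_append]
  refine List.map_congr_left (fun i _ => ?_)
  simp [pyCeilDiv, neg_sub]

-- reference grouping: scan with the current group's leader and pending size
def tailGroups (leader pending : Int) : List Int → List Int
  | [] => [pending]
  | x :: xs => if x > leader then pending :: tailGroups x 1 xs else tailGroups leader (pending + 1) xs

def tgTop : List Int → List Int
  | [] => []
  | x :: xs => tailGroups x 1 xs

def cntLe (front : Int) : List Int → Nat
  | [] => 0
  | x :: xs => if x ≤ front then cntLe front xs + 1 else 0

def finishA (d : List Int) (st : List Int × Nat) : List Int :=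
  st.1 ++ [(d.length : Int) - (st.2 : Int)]

theorem loopA (d : List Int) (rest : List Int) (j idx : Nat) (ans : List Int)
    (hrest : d.drop j = rest) (hj : j ≤ d.length) (hidx : idx < d.length) :
    finishA d ((List.range' j (d.length - j)).foldl (stepA d) (ans, idx)) =
      ans ++ tailGroups (PySem.List.pyGetD d (idx : Int) 0) ((j : Int) - (idx : Int)) rest := by
  induction rest generalizing j idx ans with
  | nil =>
    have hge : d.length ≤ j := by
      by_contra hlt
      push_neg at hlt
      have : d.drop j ≠ [] := by
        intro hnil
        have := List.drop_eq_nil_iff.mp hnil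
        omega
      exact this hrest
    have hjl : j = d.length := le_antisymm hj hge
    subst hjl
    simp [finishA, tailGroups]
  | cons x xs ih =>
    have hjlt : j < d.length := by
      by_contra hge
      push_neg at hge
      rw [List.drop_eq_nil_iff.mpr hge] at hrest
      exact List.cons_ne_nil x xs hrest.symm
    have hx : d[j] = x := by
      have h0 := congrArg (fun l => l[0]?) hrest
      simp only [List.getElem?_drop, Nat.add_zero] at h0
      simpa [List.getElem?_eq_getElem hjlt] using h0
    have hxs : d.drop (j + 1) = xs := by
      have := congrArg (List.drop 1) hrest
      simpa [List.drop_drop, Nat.add_comm] using this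
    have hrange : List.range' j (d.length - j) = j :: List.range' (j + 1) (d.length - (j + 1)) := by
      have : d.length - j = (d.length - (j + 1)) + 1 := by omega
      rw [this, List.range'_succ]
    rw [hrange, List.foldl_cons]
    have hgj : PySem.List.pyGetD d (j : Int) 0 = x := by
      rw [PySem.List.pyGetD_natCast, List.getD_eq_getElem?_getD, List.getElem?_eq_getElem hjlt]
      simpa using hx
    have hgidx : PySem.List.pyGetD d (idx : Int) 0 = d[idx] := by
      rw [PySem.List.pyGetD_natCast, List.getD_eq_getElem?_getD, List.getElem?_eq_getElem hidx]
      rfl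
    by_cases hgt : x > d[idx]
    · have hstep : stepA d (ans, idx) j = (ans ++ [(j : Int) - (idx : Int)], j) := by
        simp [stepA, hgj, hgidx, hgt]
      rw [hstep, ih (j + 1) j (ans ++ [(j : Int) - (idx : Int)]) hxs (by omega) hjlt]
      rw [hgidx, hgj]
      have h1 : ((j : Int) + 1) - (j : Int) = 1 := by ring
      push_cast
      rw [h1]
      simp [tailGroups, hgt, List.append_assoc]
    · have hstep : stepA d (ans, idx) j = (ans, idx) := by
        simp [stepA, hgj, hgidx, hgt]
      rw [hstep, ih (j + 1) idx ans hxs (by omega) hidx]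
      rw [hgidx]
      simp only [tailGroups, if_neg hgt]
      have h1 : ((j + 1 : Nat) : Int) - (idx : Int) = ((j : Int) - (idx : Int)) + 1 := by
        push_cast; ring
      rw [h1]

theorem innerCount_eq (fuel : Nat) (days : List Int) (front : Int) (count : Nat)
    (h : count ≤ days.length) (hf : days.length ≤ count + fuel) :
    innerCount fuel days front count = count + cntLe front (days.drop count) := by
  induction fuel generalizing count with
  | zero =>
    have hc : count = days.length := by omega
    have : days.drop count = [] := List.drop_eq_nil_iff.mpr (by omega)
    simp [innerCount, this, cntLe]
  | succ fuel ih =>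
    simp only [innerCount]
    split
    case isTrue h' =>
      obtain ⟨hlt, hle⟩ := h'
      rw [ih (count + 1) (by omega) (by omega)]
      have hdrop : days.drop count = days[count] :: days.drop (count + 1) :=
        List.drop_eq_getElem_cons hlt
      have hg : PySem.List.pyGetD days (count : Int) 0 = days[count] := by
        rw [PySem.List.pyGetD_natCast, List.getD_eq_getElem?_getD, List.getElem?_eq_getElem hlt]
        rfl
      rw [hdrop]
      simp only [cntLe]
      rw [if_pos (hg ▸ hle)]
      omega
    case isFalse h' =>
      by_cases hlt : count < days.length
      · have hle : ¬ PySem.List.pyGetD days (count : Int) 0 ≤ front := fun hle => h' ⟨hlt, hle⟩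
        have hg : PySem.List.pyGetD days (count : Int) 0 = days[count] := by
          rw [PySem.List.pyGetD_natCast, List.getD_eq_getElem?_getD, List.getElem?_eq_getElem hlt]
          rfl
        rw [List.drop_eq_getElem_cons hlt]
        simp only [cntLe]
        rw [if_neg (hg ▸ hle)]
        omega
      · have : days.drop count = [] := List.drop_eq_nil_iff.mpr (by omega)
        simp [this, cntLe]

theorem tailGroups_eq (leader pending : Int) (rest : List Int) :
    tailGroups leader pending rest =
      (pending + (cntLe leader rest : Int)) :: tgTop (rest.drop (cntLe leader rest)) := by
  induction rest generalizing leader pending with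
  | nil => simp [tailGroups, cntLe, tgTop]
  | cons x xs ih =>
    by_cases hx : x ≤ leader
    · have hngt : ¬ x > leader := not_lt.mpr hx
      simp only [tailGroups, if_neg hngt, cntLe, if_pos hx, List.drop_succ_cons]
      rw [ih]
      congr 1
      push_cast
      ring
    · have hgt : x > leader := lt_of_not_ge hx
      simp only [tailGroups, if_pos hgt, cntLe, if_neg hx, List.drop_zero]
      simp [tgTop]

theorem outerLoop_eq (fuel : Nat) (days ans : List Int) (hf : days.length ≤ fuel) :
    outerLoop fuel days ans = ans ++ tgTop days := by
  induction fuel generalizing days ans with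
  | zero =>
    have : days = [] := List.eq_nil_of_length_eq_zero (by omega)
    subst this
    simp [outerLoop, tgTop]
  | succ fuel ih =>
    cases days with
    | nil => simp [outerLoop, tgTop]
    | cons d ds =>
      simp only [outerLoop]
      have hcnt : innerCount (d :: ds).length (d :: ds) d 1 = 1 + cntLe d ds := by
        rw [innerCount_eq _ _ _ _ (by simp) (by simp)]
        simp
      rw [hcnt]
      have hdrop : (d :: ds).drop (1 + cntLe d ds) = ds.drop (cntLe d ds) := by
        rw [Nat.add_comm, List.drop_succ_cons]
      rw [hdrop, ih (ds.drop (cntLe d ds)) (ans ++ [((1 + cntLe d ds : Nat) : Int)]) (by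
        simp only [List.length_drop]
        simp at hf
        omega)]
      have htg : tgTop (d :: ds) = ((1 + cntLe d ds : Nat) : Int) :: tgTop (ds.drop (cntLe d ds)) := by
        show tailGroups d 1 ds = _
        rw [tailGroups_eq]
        congr 1
      rw [htg, List.append_assoc]
      rfl

theorem daysOf_len (p s : List Int) : (daysOf p s).length = p.length := by
  simp [daysOf]

-- ===== VERDICT (by name: the statement is the Claim_ definition above) =====
theorem solution_spec : Claim_unchanged_solution := by
  intro p s _ _ hD
  show solution p s = solution_alt p s
  have hne : daysOf p s ≠ [] := by
    intro hnil
    exact hD (List.eq_nil_of_length_eq_zero (by simpa [daysOf_len p s] using congrArg List.length hnil))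
  have hB : solution_alt p s = outerLoop (daysOf p s).length (daysOf p s) [] := rfl
  have hA : solution p s =
      finishA (buildCompleted p s)
        ((List.range (buildCompleted p s).length).foldl (stepA (buildCompleted p s)) ([], 0)) := rfl
  rw [hA, hB, buildCompleted_eq, outerLoop_eq _ _ _ (le_refl _), List.nil_append]
  rw [List.range_eq_range']
  have h0 : List.range' 0 (daysOf p s).length = List.range' 0 ((daysOf p s).length - 0) := by
    simp
  rw [h0, loopA (daysOf p s) (daysOf p s) 0 0 [] (by simp) (by omega) (by
    cases h : daysOf p s with
    | nil => exact absurd h hne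
    | cons a l => simp [h])]
  obtain ⟨x, xs, h⟩ := List.exists_cons_of_ne_nil hne
  rw [h]
  simp only [PySem.List.pyGetD_zero_cons, List.nil_append]
  have h0 : ((0 : Nat) : Int) - ((0 : Nat) : Int) = 0 := by simp
  rw [h0]
  have hxx : ¬ x > x := lt_irrefl x
  simp [tailGroups, hxx, tgTop]
theorem solution_changed : Claim_changed_solution := by
  unfold Claim_changed_solution
  refine ⟨by decide, by decide, by decide, by decide, ?_, by decide⟩
  show outerLoop 0 [] [] = []
  rfl
theorem solution_tight : Claim_exact_solution := by
  intro p s _ _ hD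
  have hp : p = [] := hD
  subst hp
  have hA : solution [] s = [0] := by
    simp [solution, buildCompleted]
  have hB : solution_alt [] s = [] := by
    show outerLoop 0 [] [] = []
    rfl
  rw [hA, hB]
  simp
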